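-- pv_equiv track=rewrite | github.com/RobertMLayne/content-extractor-pro | artifacts/chunking.py | pair_segments
-- ===== SOURCE A (Python) =====
-- from typing import Callable, Iterable, Iterator, List, Optional, Sequence
--
-- def pair_segments(
--     html_segments: Sequence[str], markdown_segments: Sequence[str]
-- ) -> Iterator[tuple[int, str, str]]:
--     """Zip HTML and Markdown segments while padding shorter sequences."""
--
--     total = max(len(html_segments), len(markdown_segments))
--     for idx in range(total):
--         html_part = html_segments[idx] if idx < len(html_segments) else ""
--         md_part = (
--             markdown_segments[idx] if idx < len(markdown_segments) else ""
--         )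
--         yield idx, html_part, md_part
-- ===== SOURCE B (Python) =====
-- def pair_segments(html_segments, markdown_segments):
--     """Zip HTML and Markdown segments while padding shorter sequences."""
--     n = min(len(html_segments), len(markdown_segments))
--     paired = list(zip(html_segments, markdown_segments))
--     paired += [(part, "") for part in html_segments[n:]]
--     paired += [("", part) for part in markdown_segments[n:]]
--     for idx, (html_part, md_part) in enumerate(paired):
--         yield idx, html_part, md_part
-- ===== Notes on version B (the rewrite author's own statement) =====
-- stated objective: alternative
-- what changed: B builds the paired list in three staged passes (zip of the common prefix, then the padded leftover tail of each sequence) and enumerates the result, instead of A's single range(max) loop with per-index bounds guards.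
import Mathlib
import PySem

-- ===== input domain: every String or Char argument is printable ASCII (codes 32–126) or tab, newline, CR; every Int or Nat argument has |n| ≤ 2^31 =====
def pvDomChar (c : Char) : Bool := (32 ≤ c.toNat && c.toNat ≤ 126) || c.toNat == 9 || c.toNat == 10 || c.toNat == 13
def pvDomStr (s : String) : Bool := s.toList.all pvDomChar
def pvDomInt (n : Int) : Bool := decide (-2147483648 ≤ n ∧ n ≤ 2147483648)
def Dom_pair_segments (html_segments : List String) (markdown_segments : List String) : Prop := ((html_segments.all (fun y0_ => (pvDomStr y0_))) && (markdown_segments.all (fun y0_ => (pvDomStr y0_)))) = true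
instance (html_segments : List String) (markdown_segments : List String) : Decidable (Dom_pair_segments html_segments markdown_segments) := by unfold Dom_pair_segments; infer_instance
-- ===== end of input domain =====

-- B replaces A's guarded range(max) index loop with staged passes: zip the common prefix,
-- append each padded leftover tail, enumerate the assembled list; same return values.

-- ===== PORT A =====
-- for idx in range(max(len(h), len(m))): yield (idx, h[idx] if idx < len(h) else "", m[idx] if idx < len(m) else "")
def pair_segments (html_segments : List String) (markdown_segments : List String) : List (Int × String × String) :=
  (PySem.List.pyRange 0 (max (html_segments.length : Int) (markdown_segments.length : Int)) 1).map
    (fun idx =>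
      (idx,
       (if idx < (html_segments.length : Int) then PySem.List.pyGetD html_segments idx "" else ""),
       (if idx < (markdown_segments.length : Int) then PySem.List.pyGetD markdown_segments idx "" else "")))

-- ===== PORT B =====
-- n = min(len(h), len(m)); paired = list(zip(h, m)) + [(a,"") for a in h[n:]] + [("",b) for b in m[n:]];
-- then enumerate(paired).  h[n:] with 0 ≤ n ≤ len(h) is exactly List.drop n.
def pair_segments_alt (html_segments : List String) (markdown_segments : List String) : List (Int × String × String) :=
  let n := min html_segments.length markdown_segments.length
  let paired :=
    html_segments.zip markdown_segments
      ++ (html_segments.drop n).map (fun part => (part, ""))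
      ++ (markdown_segments.drop n).map (fun part => ("", part))
  (PySem.List.enumerate paired 0).map (fun p => (p.1, p.2.1, p.2.2))

-- ===== PRECONDITION & SPEC =====
def Spec_pair_segments (html_segments : List String) (markdown_segments : List String) (out : List (Int × String × String)) : Prop := out = pair_segments_alt html_segments markdown_segments
instance (html_segments : List String) (markdown_segments : List String) (out : List (Int × String × String)) : Decidable (Spec_pair_segments html_segments markdown_segments out) := by unfold Spec_pair_segments; infer_instance

-- ===== CLAIM (what is proved, stated in full; the proofs are below) =====
def Claim_equal_pair_segments : Prop := ∀ (html_segments : List String) (markdown_segments : List String), Dom_pair_segments html_segments markdown_segments → Spec_pair_segments html_segments markdown_segments (pair_segments html_segments markdown_segments)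

-- ===== LEMMAS AND PROOFS =====

-- a single padded list, characterised as a map over List.range
theorem map_pad_left (m : List String) :
    m.map (fun part => (("" : String), part))
      = (List.range m.length).map (fun k => (("" : String), m.getD k "")) := by
  induction m with
  | nil => simp
  | cons y ys ih =>
    simp only [List.map_cons, List.length_cons, List.range_succ_eq_map, List.map_map, ih]
    exact congrArg (_ :: ·) (List.map_congr_left (fun k _ => by simp [Function.comp]))

theorem map_pad_right (h : List String) :
    h.map (fun part => (part, ("" : String)))
      = (List.range h.length).map (fun k => (h.getD k "", ("" : String))) := by
  induction h with
  | nil => simp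
  | cons x xs ih =>
    simp only [List.map_cons, List.length_cons, List.range_succ_eq_map, List.map_map, ih]
    exact congrArg (_ :: ·) (List.map_congr_left (fun k _ => by simp [Function.comp]))

-- the three staged passes assemble exactly the padded parallel list
theorem paired_eq_map : ∀ (h m : List String),
    h.zip m
      ++ (h.drop (min h.length m.length)).map (fun part => (part, ("" : String)))
      ++ (m.drop (min h.length m.length)).map (fun part => (("" : String), part))
      = (List.range (max h.length m.length)).map (fun k => (h.getD k "", m.getD k "")) := by
  intro h
  induction h with
  | nil =>
    intro m
    simpa using map_pad_left m
  | cons x xs ih =>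
    intro m
    cases m with
    | nil =>
      simpa using map_pad_right (x :: xs)
    | cons y ys =>
      simp only [List.zip_cons_cons, List.length_cons, Nat.succ_min_succ, List.drop_succ_cons,
        Nat.succ_max_succ, List.range_succ_eq_map, List.map_cons, List.map_map, List.cons_append]
      refine congrArg (_ :: ·) ?_
      rw [ih ys]
      exact List.map_congr_left (fun k _ => by simp [Function.comp])

-- enumerate, fused with the projection map, as a map over List.range
theorem enum_proj_eq_map {α β : Type} (d : α × β) : ∀ (xs : List (α × β)) (s : Int),
    (PySem.List.enumerate xs s).map (fun p => (p.1, p.2.1, p.2.2))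
      = (List.range xs.length).map
          (fun (k : Nat) => (s + (k : Int), (xs.getD k d).1, (xs.getD k d).2)) := by
  intro xs
  induction xs with
  | nil => intro s; simp [PySem.List.enumerate_nil]
  | cons x xs ih =>
    intro s
    rw [PySem.List.enumerate_cons, List.map_cons, ih (s + 1)]
    simp only [List.length_cons, List.range_succ_eq_map, List.map_cons, List.map_map]
    refine congrArg₂ (· :: ·) (by simp) ?_
    apply List.map_congr_left
    intro k _
    simp only [Function.comp, List.getD_cons_succ]
    congr 1
    push_cast; ring

-- A's range loop, characterised as the same map
theorem pair_segments_eq_map (h m : List String) :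
    pair_segments h m = (List.range (max h.length m.length)).map
      (fun (k : Nat) => ((0 + (k : Int)), h.getD k "", m.getD k "")) := by
  unfold pair_segments
  have htot : (max (h.length : Int) (m.length : Int)) = ((max h.length m.length : Nat) : Int) := by
    push_cast; rfl
  rw [htot, PySem.List.pyRange_zero_nat, List.map_map]
  apply List.map_congr_left
  intro k hk
  simp only [List.mem_range] at hk
  simp only [Function.comp]
  have hget : ∀ (xs : List String), (if (k : Int) < (xs.length : Int) then PySem.List.pyGetD xs (k : Int) "" else "") = xs.getD k "" := by
    intro xs
    by_cases hkx : k < xs.length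
    · rw [if_pos (by exact_mod_cast hkx), PySem.List.pyGetD_natCast]
    · rw [if_neg (by exact_mod_cast hkx), List.getD_eq_default _ _ (by omega)]
  refine Prod.ext (by simp) (Prod.ext ?_ ?_)
  · exact (hget h).symm ▸ rfl
  · exact (hget m).symm ▸ rfl

-- B, characterised as the same map
theorem pair_segments_alt_eq_map (h m : List String) :
    pair_segments_alt h m = (List.range (max h.length m.length)).map
      (fun (k : Nat) => ((0 + (k : Int)), h.getD k "", m.getD k "")) := by
  unfold pair_segments_alt
  dsimp only
  rw [paired_eq_map h m, enum_proj_eq_map ("","")]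
  rw [List.length_map, List.length_range]
  apply List.map_congr_left
  intro k hk
  simp only [List.mem_range] at hk
  rw [List.getD_eq_getElem _ _ (by simpa using hk)]
  simp

-- ===== VERDICT (by name: the statement is the Claim_ definition above) =====
theorem pair_segments_spec : Claim_equal_pair_segments := by
  intro h m _
  unfold Spec_pair_segments
  rw [pair_segments_eq_map, pair_segments_alt_eq_map]
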